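-- pv_equiv track=rewrite | github.com/jonesetc/leetcode | src/leetcode/problems/walking_robot_simulation.py | solution
-- ===== SOURCE A (Python) =====
-- def solution(commands: list[int], obstacles: list[list[int]]) -> int:
--     obs = set(map(tuple, obstacles))
--
--     curr_dir = (0, 1)
--     curr_pos = (0, 0)
--     max_dist = 0
--
--     for command in commands:
--         if command == -1:
--             curr_dir = (curr_dir[1], -curr_dir[0])
--         elif command == -2:
--             curr_dir = (-curr_dir[1], curr_dir[0])
--         else:
--             for _ in range(command):
--                 new_pos = (
--                     curr_pos[0] + curr_dir[0],
--                     curr_pos[1] + curr_dir[1],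
--                 )
--
--                 if new_pos not in obs:
--                     curr_pos = new_pos
--                 else:
--                     break
--
--             max_dist = max(max_dist, curr_pos[0] ** 2 + curr_pos[1] ** 2)
--
--     return max_dist
-- ===== SOURCE B (Python) =====
-- def solution(commands: list[int], obstacles: list[list[int]]) -> int:
--     dx, dy = 0, 1
--     x, y = 0, 0
--     best = 0
--     for c in commands:
--         if c == -1:
--             dx, dy = dy, -dx
--         elif c == -2:
--             dx, dy = -dy, dx
--         else:
--             steps = c if c > 0 else 0
--             blk = None
--             for o in obstacles:
--                 if len(o) != 2:
--                     continue
--                 ox, oy = o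
--                 t = dx * (ox - x) + dy * (oy - y)
--                 if 1 <= t <= steps and ox - x == t * dx and oy - y == t * dy:
--                     if blk is None or t < blk:
--                         blk = t
--             move = steps if blk is None else blk - 1
--             x += dx * move
--             y += dy * move
--             best = max(best, x * x + y * y)
--     return best
-- ===== Notes on version B (the rewrite author's own statement) =====
-- stated objective: faster
-- what changed: B replaces A's unit-step simulation of every move (one set lookup per step, O(command) iterations per command) by computing, per command, the distance to the nearest blocking obstacle on the ray with a single scan over the obstacle list and jumping there in one arithmetic move.
import Mathlib
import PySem

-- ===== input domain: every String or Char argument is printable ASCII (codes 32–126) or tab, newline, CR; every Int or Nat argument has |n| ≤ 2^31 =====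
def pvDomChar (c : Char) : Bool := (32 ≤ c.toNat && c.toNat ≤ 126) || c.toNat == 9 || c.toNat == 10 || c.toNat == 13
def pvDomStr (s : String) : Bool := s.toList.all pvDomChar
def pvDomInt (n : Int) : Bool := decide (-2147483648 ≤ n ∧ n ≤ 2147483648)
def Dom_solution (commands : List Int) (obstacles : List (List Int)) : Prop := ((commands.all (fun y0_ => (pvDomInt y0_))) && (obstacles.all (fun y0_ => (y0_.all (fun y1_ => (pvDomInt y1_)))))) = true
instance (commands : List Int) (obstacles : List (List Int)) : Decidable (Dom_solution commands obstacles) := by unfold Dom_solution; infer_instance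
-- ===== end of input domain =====

-- B replaces A's unit-step simulation of each move by a per-command scan for the
-- nearest blocking obstacle on the ray, jumping there in one arithmetic move
-- (objective: faster, measured; same return value).

-- ===== PORT A =====
-- inner 'for _ in range(command): … break' loop of A
def solWalkA (obs : PySem.Set (List Int)) (d : Int × Int) (p : Int × Int) : Nat → Int × Int
  | 0 => p
  | Nat.succ n =>
    let np := (p.1 + d.1, p.2 + d.2)
    if PySem.Set.contains obs [np.1, np.2] then p
    else solWalkA obs d np n

-- body of A's 'for command in commands' loop; state = (curr_dir, curr_pos, max_dist)
def solStepA (obs : PySem.Set (List Int)) (st : (Int × Int) × (Int × Int) × Int)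
    (command : Int) : (Int × Int) × (Int × Int) × Int :=
  let d := st.1
  let p := st.2.1
  let m := st.2.2
  if command = -1 then ((d.2, -d.1), p, m)
  else if command = -2 then ((-d.2, d.1), p, m)
  else
    let p' := solWalkA obs d p command.toNat
    (d, p', max m (p'.1 ^ 2 + p'.2 ^ 2))

def solution (commands : List Int) (obstacles : List (List Int)) : Int :=
  let obs : PySem.Set (List Int) := PySem.Set.ofList obstacles
  (commands.foldl (solStepA obs) ((0, 1), (0, 0), 0)).2.2

-- ===== PORT B =====
-- body of B's inner 'for o in obstacles' scan: running minimum blocker distance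
def solBStep (dx dy x y steps : Int) (blk : Option Int) (o : List Int) : Option Int :=
  match o with
  | [ox, oy] =>
    let t := dx * (ox - x) + dy * (oy - y)
    if 1 ≤ t ∧ t ≤ steps ∧ ox - x = t * dx ∧ oy - y = t * dy then
      match blk with
      | none => some t
      | some m => if t < m then some t else some m
    else blk
  | _ => blk

def solBlocker (obstacles : List (List Int)) (dx dy x y steps : Int) : Option Int :=
  obstacles.foldl (solBStep dx dy x y steps) none

-- body of B's 'for c in commands' loop; state = ((dx,dy), (x,y), best)
def solStepB (obstacles : List (List Int)) (st : (Int × Int) × (Int × Int) × Int)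
    (c : Int) : (Int × Int) × (Int × Int) × Int :=
  let dx := st.1.1
  let dy := st.1.2
  let x := st.2.1.1
  let y := st.2.1.2
  let best := st.2.2
  if c = -1 then ((dy, -dx), (x, y), best)
  else if c = -2 then ((-dy, dx), (x, y), best)
  else
    let steps := if c > 0 then c else 0
    let move := match solBlocker obstacles dx dy x y steps with
      | none => steps
      | some t => t - 1
    let x' := x + dx * move
    let y' := y + dy * move
    ((dx, dy), (x', y'), max best (x' * x' + y' * y'))

def solution_alt (commands : List Int) (obstacles : List (List Int)) : Int :=
  (commands.foldl (solStepB obstacles) ((0, 1), (0, 0), 0)).2.2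

-- ===== PRECONDITION & SPEC =====
def Spec_solution (commands : List Int) (obstacles : List (List Int)) (out : Int) : Prop := out = solution_alt commands obstacles
instance (commands : List Int) (obstacles : List (List Int)) (out : Int) : Decidable (Spec_solution commands obstacles out) := by unfold Spec_solution; infer_instance

-- ===== CLAIM (what is proved, stated in full; the proofs are below) =====
def Claim_equal_solution : Prop := ∀ (commands : List Int) (obstacles : List (List Int)), Dom_solution commands obstacles → Spec_solution commands obstacles (solution commands obstacles)

-- ===== LEMMAS AND PROOFS =====

-- the direction is always one of the four axis unit vectors
def UnitDir (dx dy : Int) : Prop :=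
  (dx = 0 ∧ dy = 1) ∨ (dx = 1 ∧ dy = 0) ∨ (dx = 0 ∧ dy = -1) ∨ (dx = -1 ∧ dy = 0)

lemma solBStep_none (dx dy x y steps : Int) (h : steps ≤ 0) (o : List Int) :
    solBStep dx dy x y steps none o = none := by
  rcases o with _ | ⟨ox, _ | ⟨oy, _ | ⟨z, r⟩⟩⟩ <;> simp only [solBStep]
  split_ifs with h1
  · omega
  · rfl

lemma solBlocker_nonpos (l : List (List Int)) (dx dy x y steps : Int) (h : steps ≤ 0) :
    solBlocker l dx dy x y steps = none := by
  unfold solBlocker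
  induction l with
  | nil => rfl
  | cons o t ih => rw [List.foldl_cons, solBStep_none dx dy x y steps h o]; exact ih

lemma solBStep_keep_one (dx dy x y steps : Int) (o : List Int) :
    solBStep dx dy x y steps (some 1) o = some 1 := by
  rcases o with _ | ⟨ox, _ | ⟨oy, _ | ⟨z, r⟩⟩⟩ <;> simp only [solBStep]
  split_ifs with h1 h2
  · omega
  · rfl
  · rfl

lemma solBStep_ge_one (dx dy x y steps : Int) (blk : Option Int) (o : List Int)
    (hb : ∀ m, blk = some m → 1 ≤ m) :
    ∀ m, solBStep dx dy x y steps blk o = some m → 1 ≤ m := by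
  intro m
  rcases o with _ | ⟨ox, _ | ⟨oy, _ | ⟨z, r⟩⟩⟩ <;> rcases blk with _ | b <;>
    simp only [solBStep] <;> intro hm <;> try exact hb m hm
  · split_ifs at hm with h1
    simp only [Option.some.injEq] at hm
    omega
  · have hb1 : (1 : Int) ≤ b := hb b rfl
    split_ifs at hm with h1 h2 <;> simp only [Option.some.injEq] at hm <;> omega

lemma solBStep_hit (dx dy x y steps : Int) (hd : UnitDir dx dy) (hs : 1 ≤ steps)
    (blk : Option Int) (hb : ∀ m, blk = some m → 1 ≤ m) :
    solBStep dx dy x y steps blk [x + dx, y + dy] = some 1 := by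
  have ht : dx * (x + dx - x) + dy * (y + dy - y) = 1 := by
    rcases hd with ⟨h1, h2⟩ | ⟨h1, h2⟩ | ⟨h1, h2⟩ | ⟨h1, h2⟩ <;> subst h1 <;> subst h2 <;> ring
  rcases blk with _ | b
  · simp only [solBStep, ht]
    rw [if_pos ⟨le_refl 1, hs, by ring, by ring⟩]
  · have hb1 : (1 : Int) ≤ b := hb b rfl
    simp only [solBStep, ht]
    rw [if_pos ⟨le_refl 1, hs, by ring, by ring⟩]
    split_ifs with h2
    · rfl
    · have hb2 : b = 1 := by omega
      rw [hb2]

lemma solBlocker_fold_one (dx dy x y steps : Int) (hd : UnitDir dx dy) (hs : 1 ≤ steps) :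
    ∀ (l : List (List Int)) (blk : Option Int), [x + dx, y + dy] ∈ l →
      (∀ m, blk = some m → 1 ≤ m) →
      l.foldl (solBStep dx dy x y steps) blk = some 1 := by
  intro l
  induction l with
  | nil => intro blk hmem _; cases hmem
  | cons o t ih =>
    intro blk hmem hb
    rw [List.foldl_cons]
    rcases List.mem_cons.mp hmem with heq | hmem'
    · rw [← heq]
      rw [solBStep_hit dx dy x y steps hd hs blk hb]
      clear ih hmem hb heq
      induction t with
      | nil => rfl
      | cons o2 t2 ih2 => rw [List.foldl_cons, solBStep_keep_one]; exact ih2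
    · exact ih _ hmem' (solBStep_ge_one dx dy x y steps blk o hb)

lemma solBStep_shift (dx dy x y steps : Int) (hd : UnitDir dx dy)
    (o : List Int) (hne : o ≠ [x + dx, y + dy]) (b : Option Int) :
    solBStep dx dy x y steps (Option.map (· + 1) b) o =
      Option.map (· + 1) (solBStep dx dy (x + dx) (y + dy) (steps - 1) b o) := by
  rcases o with _ | ⟨ox, _ | ⟨oy, _ | ⟨z, r⟩⟩⟩ <;> simp only [solBStep] <;> try rfl
  have hxy : ox ≠ x + dx ∨ oy ≠ y + dy := by
    by_cases h1 : ox = x + dx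
    · exact Or.inr (fun h2 => hne (by rw [h1, h2]))
    · exact Or.inl h1
  rcases hd with ⟨h1, h2⟩ | ⟨h1, h2⟩ | ⟨h1, h2⟩ | ⟨h1, h2⟩ <;> subst h1 <;> subst h2 <;>
    rcases b with _ | m <;>
    simp only [Option.map_some, Option.map_none] <;>
    split_ifs <;>
    simp only [Option.map_some, Option.map_none, Option.some.injEq, reduceCtorEq] <;>
    omega

lemma solBlocker_shift (l : List (List Int)) (dx dy x y steps : Int) (hd : UnitDir dx dy)
    (hmem : [x + dx, y + dy] ∉ l) :
    solBlocker l dx dy x y steps =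
      Option.map (· + 1) (solBlocker l dx dy (x + dx) (y + dy) (steps - 1)) := by
  unfold solBlocker
  have key : ∀ (t : List (List Int)) (b : Option Int), [x + dx, y + dy] ∉ t →
      t.foldl (solBStep dx dy x y steps) (Option.map (· + 1) b) =
        Option.map (· + 1) (t.foldl (solBStep dx dy (x + dx) (y + dy) (steps - 1)) b) := by
    intro t
    induction t with
    | nil => intro b _; rfl
    | cons o t2 ih =>
      intro b hm
      rw [List.foldl_cons, List.foldl_cons,
        solBStep_shift dx dy x y steps hd o (fun h => hm (h ▸ List.mem_cons_self)) b]
      exact ih _ (fun h => hm (List.mem_cons_of_mem _ h))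
  exact key l none hmem

lemma walk_eq (l : List (List Int)) (dx dy : Int) (hd : UnitDir dx dy) :
    ∀ (n : Nat) (x y : Int),
      solWalkA (PySem.Set.ofList l) (dx, dy) (x, y) n =
        (x + dx * (match solBlocker l dx dy x y (n : Int) with
                   | none => (n : Int)
                   | some t => t - 1),
         y + dy * (match solBlocker l dx dy x y (n : Int) with
                   | none => (n : Int)
                   | some t => t - 1)) := by
  intro n
  induction n with
  | zero =>
    intro x y
    rw [solBlocker_nonpos l dx dy x y _ (by norm_num)]
    simp [solWalkA]
  | succ n ih =>
    intro x y
    have hs : (1 : Int) ≤ ((n + 1 : Nat) : Int) := by push_cast; omega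
    by_cases hmem : [x + dx, y + dy] ∈ l
    · have hc : PySem.Set.contains (PySem.Set.ofList l) [x + dx, y + dy] = true := by
        exact (PySem.Set.contains_iff _ _).mpr ((PySem.Set.mem_ofList l _).mpr hmem)
      have hb : solBlocker l dx dy x y ((n + 1 : Nat) : Int) = some 1 := by
        unfold solBlocker
        exact solBlocker_fold_one dx dy x y _ hd hs l none hmem (by intro m h; cases h)
      simp only [solWalkA, hc, if_true, hb]
      norm_num
    · have hc : PySem.Set.contains (PySem.Set.ofList l) [x + dx, y + dy] = false := by
        rw [Bool.eq_false_iff]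
        intro h
        exact hmem ((PySem.Set.mem_ofList l _).mp ((PySem.Set.contains_iff _ _).mp h))
      have hshift : solBlocker l dx dy x y ((n + 1 : Nat) : Int) =
          Option.map (· + 1) (solBlocker l dx dy (x + dx) (y + dy) ((n : Nat) : Int)) := by
        have hcast : ((n + 1 : Nat) : Int) - 1 = ((n : Nat) : Int) := by push_cast; ring
        rw [solBlocker_shift l dx dy x y _ hd hmem, hcast]
      simp only [solWalkA, hc, Bool.false_eq_true, if_false]
      rw [ih (x + dx) (y + dy), hshift]
      rcases solBlocker l dx dy (x + dx) (y + dy) ((n : Nat) : Int) with _ | t <;>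
        simp only [Option.map_some, Option.map_none] <;> rw [Prod.mk.injEq] <;>
        refine ⟨?_, ?_⟩ <;> push_cast <;> ring

lemma step_eq (l : List (List Int)) (dx dy x y m c : Int) (hd : UnitDir dx dy) :
    solStepA (PySem.Set.ofList l) ((dx, dy), (x, y), m) c = solStepB l ((dx, dy), (x, y), m) c := by
  unfold solStepA solStepB
  by_cases hc1 : c = -1
  · simp [hc1]
  by_cases hc2 : c = -2
  · simp [hc2]
  simp only [hc1, hc2, if_false]
  have hsteps : ((c.toNat : Nat) : Int) = if c > 0 then c else 0 := by
    split_ifs <;> omega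
  rw [walk_eq l dx dy hd c.toNat x y, hsteps]
  simp [pow_two]

lemma dir_preserved (l : List (List Int)) (st : (Int × Int) × (Int × Int) × Int) (c : Int)
    (hd : UnitDir st.1.1 st.1.2) :
    UnitDir (solStepB l st c).1.1 (solStepB l st c).1.2 := by
  unfold solStepB
  split_ifs
  · rcases hd with ⟨h1, h2⟩ | ⟨h1, h2⟩ | ⟨h1, h2⟩ | ⟨h1, h2⟩ <;> rw [h1, h2] <;>
      simp [UnitDir]
  · rcases hd with ⟨h1, h2⟩ | ⟨h1, h2⟩ | ⟨h1, h2⟩ | ⟨h1, h2⟩ <;> rw [h1, h2] <;>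
      simp [UnitDir]
  · exact hd
  · exact hd

lemma loop_eq (l : List (List Int)) :
    ∀ (cmds : List Int) (st : (Int × Int) × (Int × Int) × Int), UnitDir st.1.1 st.1.2 →
      cmds.foldl (solStepA (PySem.Set.ofList l)) st = cmds.foldl (solStepB l) st := by
  intro cmds
  induction cmds with
  | nil => intro st _; rfl
  | cons c t ih =>
    intro st hd
    obtain ⟨⟨dx, dy⟩, ⟨x, y⟩, m⟩ := st
    rw [List.foldl_cons, List.foldl_cons, step_eq l dx dy x y m c hd]
    exact ih _ (dir_preserved l _ c hd)

-- ===== VERDICT (by name: the statement is the Claim_ definition above) =====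
theorem solution_spec : Claim_equal_solution := by
  intro commands obstacles _
  unfold Spec_solution solution solution_alt
  show (commands.foldl (solStepA (PySem.Set.ofList obstacles)) ((0, 1), (0, 0), 0)).2.2 =
    (commands.foldl (solStepB obstacles) ((0, 1), (0, 0), 0)).2.2
  rw [loop_eq obstacles commands ((0, 1), (0, 0), 0) (Or.inl ⟨rfl, rfl⟩)]
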